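-- pv_equiv track=rewrite | github.com/HeX-ecutioner/dsa-space | src/notes/Techniques/Prefix Sum/Problems/WaysToSplitArrayIntoThreeSubarrays/solution.py | waysToSplit
-- ===== SOURCE A (Python) =====
-- import bisect
--
-- def waysToSplit(nums):
--     """
--     Approach: Prefix Sum with Binary Search.
--     Time: O(N log N)
--     Space: O(N)
--     """
--     n = len(nums)
--     prefix = [0] * n
--     prefix[0] = nums[0]
--     for i in range(1, n): prefix[i] = prefix[i-1] + nums[i]
--     res, MOD = 0, 10**9 + 7
--     for i in range(n - 2):
--         left_sum = prefix[i]
--         j = bisect.bisect_left(prefix, 2 * left_sum, i + 1, n - 1)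
--         k = bisect.bisect_right(prefix, (prefix[-1] + prefix[i]) // 2, i + 1, n - 1)
--         if k > j: res = (res + k - j) % MOD
--     return res
-- ===== SOURCE B (Python) =====
-- def waysToSplit(nums):
--     """
--     Approach: Prefix sums with two monotonic pointers (no binary search).
--     Time: O(N)
--     Space: O(N)
--     """
--     n = len(nums)
--     prefix = []
--     s = 0
--     for x in nums:
--         s += x
--         prefix.append(s)
--     total = prefix[-1]
--     MOD = 10**9 + 7
--     res = 0
--     j = k = 0
--     for i in range(n - 2):
--         left = prefix[i]
--         if j < i + 1:
--             j = i + 1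
--         while j < n - 1 and prefix[j] < 2 * left:
--             j += 1
--         if k < j:
--             k = j
--         while k < n - 1 and prefix[k] <= (total + left) // 2:
--             k += 1
--         res = (res + k - j) % MOD
--     return res
-- ===== Notes on version B (the rewrite author's own statement) =====
-- stated objective: alternative
-- what changed: Replaces the per-index pair of binary searches over the prefix-sum array with two forward-only monotonic pointers (amortised O(1) per index instead of O(log n)).
-- outside the precondition, e.g. on waysToSplit([1, -1, 1, 1]): A returns 1, B returns 0
import Mathlib
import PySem

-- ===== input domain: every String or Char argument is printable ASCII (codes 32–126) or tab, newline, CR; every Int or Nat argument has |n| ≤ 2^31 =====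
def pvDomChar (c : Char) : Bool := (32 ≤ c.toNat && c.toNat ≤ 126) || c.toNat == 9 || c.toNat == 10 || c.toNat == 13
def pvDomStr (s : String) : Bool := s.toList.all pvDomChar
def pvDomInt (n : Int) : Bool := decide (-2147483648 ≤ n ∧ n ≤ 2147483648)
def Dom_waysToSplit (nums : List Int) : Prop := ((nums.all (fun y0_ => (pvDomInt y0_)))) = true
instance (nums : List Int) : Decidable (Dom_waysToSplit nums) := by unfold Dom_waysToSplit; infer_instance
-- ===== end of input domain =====

-- B replaces A's per-index binary searches over the prefix-sum array with two forward-only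
-- monotonic pointers; proved equal on non-empty lists whose interior elements are non-negative
-- (there the prefix array is sorted where A's bisect searches it).

-- ===== PORT A =====
-- Literal port of A: prefix array preallocated with zeros and filled in place; per index i,
-- bisect_left / bisect_right on prefix[i+1 : n-1] (PySem.List.bisectLeftLoop / bisectRightLoop
-- are CPython's bisect loops; fuel = len(prefix) bounds the halving iterations exactly as the
-- Python while-loop terminates).
def waysToSplit (nums : List Int) : Int :=
  let n := nums.length
  let pfx0 := (List.replicate n (0:Int)).set 0 (nums.getD 0 0)
  let pfx := (List.range' 1 (n-1)).foldl (fun p i => p.set i (p.getD (i-1) 0 + nums.getD i 0)) pfx0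
  let M : Int := 10 ^ 9 + 7
  (List.range (n-2)).foldl (fun res i =>
    let leftSum := pfx.getD i 0
    let j := PySem.List.bisectLeftLoop pfx (2 * leftSum) pfx.length (i+1) (n-1)
    let k := PySem.List.bisectRightLoop pfx
      (PySem.Int.floordiv (PySem.List.pyGetD pfx (-1) 0 + pfx.getD i 0) 2) pfx.length (i+1) (n-1)
    if (k:Int) > (j:Int) then PySem.Int.mod (res + (k:Int) - (j:Int)) M else res) 0

-- ===== PORT B =====
-- B-side helper: the Python `while j < hi and cond(j): j += 1` loop (fuel = hi - j iterations).
def pvAdvanceAux (f : Nat → Bool) : Nat → Nat → Nat → Nat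
  | 0, j, _ => j
  | fuel+1, j, hi => if j < hi then (if f j then pvAdvanceAux f fuel (j+1) hi else j) else j

def pvAdvance (f : Nat → Bool) (j hi : Nat) : Nat := pvAdvanceAux f (hi - j) j hi

def waysToSplit_alt (nums : List Int) : Int :=
  let n := nums.length
  let pfx := (nums.foldl (fun (acc : List Int × Int) x => (acc.1 ++ [acc.2 + x], acc.2 + x)) ([], 0)).1
  let total := PySem.List.pyGetD pfx (-1) 0
  let M : Int := 10 ^ 9 + 7
  let st := (List.range (n-2)).foldl (fun (st : Int × Nat × Nat) i =>
    let left := pfx.getD i 0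
    let j0 := if st.2.1 < i + 1 then i + 1 else st.2.1
    let j := pvAdvance (fun t => decide (pfx.getD t 0 < 2 * left)) j0 (n-1)
    let k0 := if st.2.2 < j then j else st.2.2
    let k := pvAdvance (fun t => decide (pfx.getD t 0 ≤ PySem.Int.floordiv (total + left) 2)) k0 (n-1)
    (PySem.Int.mod (st.1 + (k:Int) - (j:Int)) M, j, k)) (0, 0, 0)
  st.1

-- ===== PRECONDITION & SPEC =====
-- Pre_ excludes the empty list, on which A raises IndexError (prefix[0] = nums[0]), and lists
-- with a negative element strictly between the first and last position, on which the searched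
-- part of the prefix array need not be sorted and bisect's result on an unsorted array is an
-- accidental artefact of the binary-search path (first and last element may be negative).
def Pre_waysToSplit (nums : List Int) : Prop := nums ≠ [] ∧ ∀ x ∈ (nums.drop 1).dropLast, 0 ≤ x
instance (nums : List Int) : Decidable (Pre_waysToSplit nums) := by unfold Pre_waysToSplit; infer_instance

def pvWitness_waysToSplit : List Int := [1, 2, 2, 2, 5, 0]

def Spec_waysToSplit (nums : List Int) (out : Int) : Prop := out = waysToSplit_alt nums
instance (nums : List Int) (out : Int) : Decidable (Spec_waysToSplit nums out) := by unfold Spec_waysToSplit; infer_instance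

-- ===== CLAIM (what is proved, stated in full; the proofs are below) =====
def Claim_equal_waysToSplit : Prop := ∀ (nums : List Int), Dom_waysToSplit nums → Pre_waysToSplit nums → Spec_waysToSplit nums (waysToSplit nums)

-- ===== LEMMAS AND PROOFS =====
theorem aux_lo_le (f : Nat → Bool) : ∀ fuel j hi, j ≤ pvAdvanceAux f fuel j hi := by
  intro fuel
  induction fuel with
  | zero => intro j hi; simp [pvAdvanceAux]
  | succ fuel ih =>
    intro j hi
    simp only [pvAdvanceAux]
    split_ifs with h1 h2
    · exact le_trans (by omega) (ih (j+1) hi)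
    · exact le_refl j
    · exact le_refl j

theorem aux_le_hi (f : Nat → Bool) : ∀ fuel j hi, j ≤ hi → pvAdvanceAux f fuel j hi ≤ hi := by
  intro fuel
  induction fuel with
  | zero => intro j hi h; simpa [pvAdvanceAux]
  | succ fuel ih =>
    intro j hi h
    simp only [pvAdvanceAux]
    split_ifs with h1 h2
    · exact ih (j+1) hi (by omega)
    · exact h
    · exact h

theorem aux_true (f : Nat → Bool) : ∀ fuel j hi t, j ≤ t → t < pvAdvanceAux f fuel j hi → f t = true := by
  intro fuel
  induction fuel with
  | zero => intro j hi t h1 h2; simp [pvAdvanceAux] at h2; omega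
  | succ fuel ih =>
    intro j hi t h1 h2
    simp only [pvAdvanceAux] at h2
    split_ifs at h2 with g1 g2
    · rcases Nat.eq_or_lt_of_le h1 with rfl | hlt
      · exact g2
      · exact ih (j+1) hi t (by omega) h2
    · omega
    · omega

theorem aux_false (f : Nat → Bool) : ∀ fuel j hi, hi - j ≤ fuel →
    pvAdvanceAux f fuel j hi < hi → f (pvAdvanceAux f fuel j hi) = false := by
  intro fuel
  induction fuel with
  | zero => intro j hi hf h; simp only [pvAdvanceAux] at h ⊢; omega
  | succ fuel ih =>
    intro j hi hf h
    simp only [pvAdvanceAux] at h ⊢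
    split_ifs at h ⊢ with g1 g2
    · exact ih (j+1) hi (by omega) h
    · simpa using g2
    · omega

theorem aux_eq_of (f : Nat → Bool) : ∀ fuel j hi r, hi - j ≤ fuel → j ≤ r → r ≤ hi →
    (∀ t, j ≤ t → t < r → f t = true) → (r < hi → f r = false) →
    pvAdvanceAux f fuel j hi = r := by
  intro fuel
  induction fuel with
  | zero => intro j hi r hf h1 h2 h3 h4; simp [pvAdvanceAux]; omega
  | succ fuel ih =>
    intro j hi r hf h1 h2 h3 h4
    simp only [pvAdvanceAux]
    split_ifs with g1 g2
    · rcases Nat.eq_or_lt_of_le h1 with rfl | hlt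
      · rw [h4 g1] at g2; exact absurd g2 (by simp)
      · exact ih (j+1) hi r (by omega) (by omega) h2 (fun t a b => h3 t (by omega) b) h4
    · rcases Nat.eq_or_lt_of_le h1 with rfl | hlt
      · rfl
      · rw [h3 j le_rfl hlt] at g2; exact absurd rfl g2
    · omega

theorem aux_ge (f : Nat → Bool) : ∀ fuel j hi r, hi - j ≤ fuel → j ≤ r → r ≤ hi →
    (∀ t, j ≤ t → t < r → f t = true) → r ≤ pvAdvanceAux f fuel j hi := by
  intro fuel
  induction fuel with
  | zero => intro j hi r hf h1 h2 h3; simp [pvAdvanceAux]; omega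
  | succ fuel ih =>
    intro j hi r hf h1 h2 h3
    simp only [pvAdvanceAux]
    split_ifs with g1 g2
    · rcases Nat.eq_or_lt_of_le h1 with rfl | hlt
      · exact le_trans (by omega) (aux_lo_le f fuel (j+1) hi)
      · exact ih (j+1) hi r (by omega) (by omega) h2 (fun t a b => h3 t (by omega) b)
    · rcases Nat.eq_or_lt_of_le h1 with rfl | hlt
      · exact le_rfl
      · rw [h3 j le_rfl hlt] at g2; exact absurd rfl g2
    · omega

-- pvAdvance versions
theorem adv_lo_le (f : Nat → Bool) (j hi : Nat) : j ≤ pvAdvance f j hi := aux_lo_le f _ j hi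
theorem adv_le_hi (f : Nat → Bool) (j hi : Nat) (h : j ≤ hi) : pvAdvance f j hi ≤ hi := aux_le_hi f _ j hi h
theorem adv_true (f : Nat → Bool) (j hi t : Nat) (h1 : j ≤ t) (h2 : t < pvAdvance f j hi) : f t = true :=
  aux_true f _ j hi t h1 h2
theorem adv_false (f : Nat → Bool) (j hi : Nat) (h : pvAdvance f j hi < hi) : f (pvAdvance f j hi) = false :=
  aux_false f _ j hi le_rfl h
theorem adv_eq_of (f : Nat → Bool) (j hi r : Nat) (h1 : j ≤ r) (h2 : r ≤ hi)
    (h3 : ∀ t, j ≤ t → t < r → f t = true) (h4 : r < hi → f r = false) :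
    pvAdvance f j hi = r := aux_eq_of f _ j hi r le_rfl h1 h2 h3 h4
theorem adv_ge (f : Nat → Bool) (j hi r : Nat) (h1 : j ≤ r) (h2 : r ≤ hi)
    (h3 : ∀ t, j ≤ t → t < r → f t = true) : r ≤ pvAdvance f j hi := aux_ge f _ j hi r le_rfl h1 h2 h3
theorem adv_shift (f : Nat → Bool) (lo j hi : Nat) (h1 : lo ≤ j) (h2 : j ≤ pvAdvance f lo hi) :
    pvAdvance f j hi = pvAdvance f lo hi := by
  by_cases hlh : lo ≤ hi
  · exact adv_eq_of f j hi _ h2 (adv_le_hi f lo hi hlh)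
      (fun t a b => adv_true f lo hi t (by omega) b) (adv_false f lo hi)
  · have : pvAdvance f lo hi = lo := by
      have : hi - lo = 0 := by omega
      simp [pvAdvance, this, pvAdvanceAux]
    have hj : j = lo := by omega
    rw [hj, this]
theorem adv_stop (f : Nat → Bool) (j hi : Nat) (h : f j = false) : pvAdvance f j hi = j := by
  unfold pvAdvance
  cases hf : hi - j with
  | zero => simp [pvAdvanceAux]
  | succ fuel => simp [pvAdvanceAux, h]
theorem adv_top (f : Nat → Bool) (j hi : Nat) (h : hi ≤ j) : pvAdvance f j hi = j := by
  have : hi - j = 0 := by omega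
  simp [pvAdvance, this, pvAdvanceAux]

theorem bisectLeftLoop_eq_adv (xs : List Int) (x : Int) (H : Nat)
    (hmon : ∀ s t : Nat, s ≤ t → t < H → xs.getD s 0 ≤ xs.getD t 0) :
    ∀ fuel lo hi, hi ≤ xs.length → hi ≤ H → hi - lo ≤ fuel →
      PySem.List.bisectLeftLoop xs x fuel lo hi =
        pvAdvance (fun t => decide (xs.getD t 0 < x)) lo hi := by
  intro fuel
  induction fuel with
  | zero =>
    intro lo hi h1 hH h2
    have : PySem.List.bisectLeftLoop xs x 0 lo hi = lo := rfl
    rw [this, adv_top _ _ _ (by omega)]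
  | succ fuel ih =>
    intro lo hi h1 hH h2
    simp only [PySem.List.bisectLeftLoop]
    by_cases hlo : lo < hi
    · simp only [if_pos hlo]
      have hmid1 : lo ≤ (lo + hi) / 2 := by omega
      have hmid2 : (lo + hi) / 2 < hi := by omega
      have hmlen : (lo + hi) / 2 < xs.length := by omega
      rw [List.getElem?_eq_getElem hmlen]
      simp only
      have hget : xs[(lo + hi) / 2] = xs.getD ((lo + hi) / 2) 0 := (List.getD_eq_getElem xs 0 hmlen).symm
      by_cases hc : xs[(lo + hi) / 2] < x
      · simp only [if_pos hc]
        rw [ih ((lo + hi) / 2 + 1) hi h1 hH (by omega)]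
        refine adv_shift _ lo ((lo + hi) / 2 + 1) hi (by omega) (adv_ge _ lo hi ((lo + hi) / 2 + 1) (by omega) (by omega) ?_)
        intro t ht1 ht2
        simp only [decide_eq_true_eq]
        calc xs.getD t 0 ≤ xs.getD ((lo + hi) / 2) 0 := hmon t _ (by omega) (by omega)
          _ < x := by rw [← hget]; exact hc
      · simp only [if_neg hc]
        rw [ih lo ((lo + hi) / 2) (by omega) (by omega) (by omega)]
        refine (adv_eq_of _ lo hi _ (adv_lo_le _ _ _) (le_trans (adv_le_hi _ _ _ (by omega)) (by omega))
          (fun t a b => adv_true _ _ _ t a b) ?_).symm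
        intro hr
        rcases Nat.lt_or_ge (pvAdvance (fun t => decide (xs.getD t 0 < x)) lo ((lo + hi) / 2)) ((lo + hi) / 2) with hl | hg
        · exact adv_false _ _ _ hl
        · have : pvAdvance (fun t => decide (xs.getD t 0 < x)) lo ((lo + hi) / 2) = (lo + hi) / 2 := by
            have := adv_le_hi (fun t => decide (xs.getD t 0 < x)) lo ((lo + hi) / 2) (by omega)
            omega
          rw [this]
          simp only [decide_eq_false_iff_not]
          rw [← hget]; exact hc
    · simp only [if_neg hlo]
      rw [adv_top _ _ _ (by omega)]

theorem bisectRightLoop_eq_adv (xs : List Int) (x : Int) (H : Nat)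
    (hmon : ∀ s t : Nat, s ≤ t → t < H → xs.getD s 0 ≤ xs.getD t 0) :
    ∀ fuel lo hi, hi ≤ xs.length → hi ≤ H → hi - lo ≤ fuel →
      PySem.List.bisectRightLoop xs x fuel lo hi =
        pvAdvance (fun t => decide (xs.getD t 0 ≤ x)) lo hi := by
  intro fuel
  induction fuel with
  | zero =>
    intro lo hi h1 hH h2
    have : PySem.List.bisectRightLoop xs x 0 lo hi = lo := rfl
    rw [this, adv_top _ _ _ (by omega)]
  | succ fuel ih =>
    intro lo hi h1 hH h2
    simp only [PySem.List.bisectRightLoop]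
    by_cases hlo : lo < hi
    · simp only [if_pos hlo]
      have hmid1 : lo ≤ (lo + hi) / 2 := by omega
      have hmid2 : (lo + hi) / 2 < hi := by omega
      have hmlen : (lo + hi) / 2 < xs.length := by omega
      rw [List.getElem?_eq_getElem hmlen]
      simp only
      have hget : xs[(lo + hi) / 2] = xs.getD ((lo + hi) / 2) 0 := (List.getD_eq_getElem xs 0 hmlen).symm
      by_cases hc : x < xs[(lo + hi) / 2]
      · simp only [if_pos hc]
        rw [ih lo ((lo + hi) / 2) (by omega) (by omega) (by omega)]
        refine (adv_eq_of _ lo hi _ (adv_lo_le _ _ _) (le_trans (adv_le_hi _ _ _ (by omega)) (by omega))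
          (fun t a b => adv_true _ _ _ t a b) ?_).symm
        intro hr
        rcases Nat.lt_or_ge (pvAdvance (fun t => decide (xs.getD t 0 ≤ x)) lo ((lo + hi) / 2)) ((lo + hi) / 2) with hl | hg
        · exact adv_false _ _ _ hl
        · have : pvAdvance (fun t => decide (xs.getD t 0 ≤ x)) lo ((lo + hi) / 2) = (lo + hi) / 2 := by
            have := adv_le_hi (fun t => decide (xs.getD t 0 ≤ x)) lo ((lo + hi) / 2) (by omega)
            omega
          rw [this]
          simp only [decide_eq_false_iff_not, not_le]
          rw [← hget]; exact hc
      · simp only [if_neg hc]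
        rw [ih ((lo + hi) / 2 + 1) hi h1 hH (by omega)]
        refine adv_shift _ lo ((lo + hi) / 2 + 1) hi (by omega) (adv_ge _ lo hi ((lo + hi) / 2 + 1) (by omega) (by omega) ?_)
        intro t ht1 ht2
        simp only [decide_eq_true_eq]
        calc xs.getD t 0 ≤ xs.getD ((lo + hi) / 2) 0 := hmon t _ (by omega) (by omega)
          _ ≤ x := by rw [← hget]; exact not_lt.mp hc
    · simp only [if_neg hlo]
      rw [adv_top _ _ _ (by omega)]

def pvPref (nums : List Int) : List Int :=
  (List.range nums.length).map (fun i => (nums.take (i+1)).sum)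

theorem pvPref_length (nums : List Int) : (pvPref nums).length = nums.length := by
  simp [pvPref]

theorem pvPref_getD (nums : List Int) (i : Nat) (h : i < nums.length) :
    (pvPref nums).getD i 0 = (nums.take (i+1)).sum := by
  rw [List.getD_eq_getElem _ 0 (by simp [pvPref_length]; omega)]
  simp [pvPref]

theorem mid_nonneg_getElem (nums : List Int) (hnn : ∀ x ∈ (nums.drop 1).dropLast, 0 ≤ x)
    (i : Nat) (h1 : 1 ≤ i) (h2 : i < nums.length - 1) : 0 ≤ nums.getD i 0 := by
  have hi : i < nums.length := by omega
  rw [List.getD_eq_getElem _ 0 hi]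
  apply hnn
  have hlen : ((nums.drop 1).dropLast).length = nums.length - 1 - 1 := by simp
  have hget : ((nums.drop 1).dropLast)[i-1]'(by omega) = nums[i] := by
    rw [List.getElem_dropLast, List.getElem_drop]
    congr 1
    omega
  rw [← hget]
  exact List.getElem_mem _

theorem sum_take_mono_mid (nums : List Int) (hnn : ∀ x ∈ (nums.drop 1).dropLast, 0 ≤ x)
    (i j : Nat) (hij : i ≤ j) (h1 : 1 ≤ i) (hj : j ≤ nums.length - 1) :
    (nums.take i).sum ≤ (nums.take j).sum := by
  obtain ⟨d, rfl⟩ : ∃ d, j = i + d := ⟨j - i, by omega⟩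
  induction d with
  | zero => exact le_rfl
  | succ d ihd =>
    have hlt : i + d < nums.length := by omega
    have hstep : (nums.take (i + d + 1)).sum = (nums.take (i + d)).sum + nums.getD (i + d) 0 := by
      rw [List.take_add_one, List.sum_append, List.getElem?_eq_getElem hlt,
        List.getD_eq_getElem _ 0 hlt]
      simp
    have hnn' : 0 ≤ nums.getD (i + d) 0 := mid_nonneg_getElem nums hnn (i + d) (by omega) (by omega)
    have hprev := ihd (by omega) (by omega)
    have hfix : (nums.take (i + (d+1))).sum = (nums.take (i + d + 1)).sum := rfl
    omega

theorem pvPref_mono (nums : List Int) (hnn : ∀ x ∈ (nums.drop 1).dropLast, 0 ≤ x) :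
    ∀ s t : Nat, s ≤ t → t < nums.length - 1 → (pvPref nums).getD s 0 ≤ (pvPref nums).getD t 0 := by
  intro s t hst ht
  rw [pvPref_getD _ s (by omega), pvPref_getD _ t (by omega)]
  exact sum_take_mono_mid nums hnn (s+1) (t+1) (by omega) (by omega) (by omega)

-- B's prefix construction
theorem prefB_general (nums : List Int) : ∀ (acc : List Int) (s : Int),
    nums.foldl (fun (acc : List Int × Int) x => (acc.1 ++ [acc.2 + x], acc.2 + x)) (acc, s) =
      (acc ++ (List.range nums.length).map (fun i => s + (nums.take (i+1)).sum), s + nums.sum) := by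
  induction nums with
  | nil => intro acc s; simp
  | cons a l ih =>
    intro acc s
    simp only [List.foldl_cons]
    rw [ih]
    refine Prod.ext ?_ (by simp [List.sum_cons]; ring)
    simp only [List.length_cons, List.range_succ_eq_map, List.map_cons, List.map_map]
    simp only [List.take_succ_cons, List.sum_cons]
    rw [List.append_assoc]
    congr 1
    simp only [List.singleton_append]
    congr 1
    · simp
    · apply List.map_congr_left
      intro i _
      simp only [Function.comp_apply]
      ring


theorem prefB_eq (nums : List Int) :
    (nums.foldl (fun (acc : List Int × Int) x => (acc.1 ++ [acc.2 + x], acc.2 + x)) ([], 0)).1 = pvPref nums := by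
  rw [prefB_general]
  simp [pvPref]

theorem pvPref_getD_succ (nums : List Int) (m : Nat) (h : m + 1 < nums.length) :
    (nums.take (m+2)).sum = (nums.take (m+1)).sum + nums.getD (m+1) 0 := by
  rw [show m + 2 = (m+1) + 1 from rfl, List.take_add_one, List.sum_append,
    List.getElem?_eq_getElem h]
  rw [List.getD_eq_getElem _ 0 h]
  simp

theorem take_one_sum (nums : List Int) (h : nums ≠ []) : (nums.take 1).sum = nums.getD 0 0 := by
  cases nums with
  | nil => simp at h
  | cons a l => simp

theorem prefA_inv (nums : List Int) (hne : nums ≠ []) :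
    ∀ m, m ≤ nums.length - 1 →
      (List.range' 1 m).foldl (fun p i => p.set i (p.getD (i-1) 0 + nums.getD i 0))
        ((List.replicate nums.length (0:Int)).set 0 (nums.getD 0 0)) =
      (pvPref nums).take (m+1) ++ List.replicate (nums.length - (m+1)) 0 := by
  have hn : 1 ≤ nums.length := by
    cases nums with | nil => simp at hne | cons a l => simp
  intro m
  induction m with
  | zero =>
    intro _
    simp only [List.range'_zero, List.foldl_nil]
    have h1 : List.replicate nums.length (0:Int) = 0 :: List.replicate (nums.length - 1) 0 := by
      cases hv : nums.length with
      | zero => omega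
      | succ k => simp [List.replicate_succ]
    rw [h1, List.set_cons_zero]
    have h2 : (pvPref nums).take 1 = [(nums.take 1).sum] := by
      obtain ⟨k, hk⟩ : ∃ k, nums.length = k + 1 := ⟨nums.length - 1, by omega⟩
      simp only [pvPref, hk, List.range_succ_eq_map, List.map_cons, List.take_succ_cons,
        List.take_zero]
    rw [h2, take_one_sum nums hne]
    simp only [List.singleton_append]
  | succ m ih =>
    intro hm
    rw [List.range'_1_concat, List.foldl_append]
    rw [ih (by omega)]
    simp only [List.foldl_cons, List.foldl_nil]
    have hTlen : ((pvPref nums).take (m+1)).length = m + 1 := by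
      rw [List.length_take, pvPref_length]; omega
    have hgetD : (((pvPref nums).take (m+1)) ++ List.replicate (nums.length - (m+1)) 0).getD m 0
        = (nums.take (m+1)).sum := by
      rw [List.getD_append _ _ 0 m (by omega)]
      rw [List.getD_eq_getElem _ 0 (by omega), List.getElem_take, ← List.getD_eq_getElem _ 0 (by rw [pvPref_length]; omega)]
      exact pvPref_getD nums m (by omega)
    have h1m : 1 + m - 1 = m := by omega
    have h1m' : 1 + m = m + 1 := by omega
    rw [h1m, h1m', hgetD]
    rw [List.set_append]
    rw [if_neg (by omega)]
    have hrep : List.replicate (nums.length - (m+1)) (0:Int) = 0 :: List.replicate (nums.length - (m+2)) 0 := by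
      have : nums.length - (m+1) = (nums.length - (m+2)) + 1 := by omega
      rw [this, List.replicate_succ]
    rw [hTlen]
    have hidx : m + 1 - (m + 1) = 0 := by omega
    rw [hidx, hrep, List.set_cons_zero]
    have htake : (pvPref nums).take (m+2) = (pvPref nums).take (m+1) ++ [(nums.take (m+1)).sum + nums.getD (m+1) 0] := by
      rw [show m + 2 = (m+1) + 1 from rfl, List.take_add_one]
      congr 1
      rw [List.getElem?_eq_getElem (by rw [pvPref_length]; omega)]
      simp only [Option.toList_some]
      congr 1
      rw [← List.getD_eq_getElem _ 0 (by rw [pvPref_length]; omega), pvPref_getD nums (m+1) (by omega)]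
      exact pvPref_getD_succ nums m (by omega)
    rw [htake, List.append_assoc]
    rfl

theorem prefA_eq (nums : List Int) (hne : nums ≠ []) :
    (List.range' 1 (nums.length - 1)).foldl (fun p i => p.set i (p.getD (i-1) 0 + nums.getD i 0))
      ((List.replicate nums.length (0:Int)).set 0 (nums.getD 0 0)) = pvPref nums := by
  rw [prefA_inv nums hne (nums.length - 1) le_rfl]
  have hn : 1 ≤ nums.length := by cases nums with | nil => simp at hne | cons a l => simp
  have h1 : nums.length - 1 + 1 = nums.length := by omega
  rw [h1, Nat.sub_self, List.replicate_zero, List.append_nil,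
    List.take_of_length_le (by rw [pvPref_length])]

def pvM : Int := 10 ^ 9 + 7

def pvLb (p : List Int) (n i : Nat) : Nat :=
  pvAdvance (fun t => decide (p.getD t 0 < 2 * p.getD i 0)) (i+1) (n-1)

def pvRb (p : List Int) (n i : Nat) : Nat :=
  pvAdvance (fun t => decide (p.getD t 0 ≤ PySem.Int.floordiv (p.getD (n-1) 0 + p.getD i 0) 2)) (i+1) (n-1)

def pvStepA (p : List Int) (n : Nat) (res : Int) (i : Nat) : Int :=
  if ((pvRb p n i : Int) > (pvLb p n i : Int)) then
    PySem.Int.mod (res + (pvRb p n i : Int) - (pvLb p n i : Int)) pvM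
  else res

def pvStepB (p : List Int) (n : Nat) (st : Int × Nat × Nat) (i : Nat) : Int × Nat × Nat :=
  let left := p.getD i 0
  let j0 := if st.2.1 < i + 1 then i + 1 else st.2.1
  let j := pvAdvance (fun t => decide (p.getD t 0 < 2 * left)) j0 (n-1)
  let k0 := if st.2.2 < j then j else st.2.2
  let k := pvAdvance (fun t => decide (p.getD t 0 ≤ PySem.Int.floordiv (p.getD (n-1) 0 + left) 2)) k0 (n-1)
  (PySem.Int.mod (st.1 + (k:Int) - (j:Int)) pvM, j, k)

theorem floordiv2_mono (a b : Int) (h : a ≤ b) :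
    PySem.Int.floordiv a 2 ≤ PySem.Int.floordiv b 2 := by
  rw [PySem.Int.floordiv_eq_ediv_of_pos (by norm_num), PySem.Int.floordiv_eq_ediv_of_pos (by norm_num)]
  exact Int.ediv_le_ediv (by norm_num) h

theorem pvLb_mono (p : List Int) (n : Nat)
    (hmon : ∀ s t : Nat, s ≤ t → t < n - 1 → p.getD s 0 ≤ p.getD t 0)
    (i : Nat) (h : i + 1 < n - 1) : pvLb p n i ≤ pvLb p n (i+1) := by
  rcases Nat.lt_or_ge (i+1) (pvLb p n i) with hgt | hle
  · unfold pvLb at *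
    apply adv_ge _ (i+1+1) (n-1) _ (by omega) (adv_le_hi _ _ _ (by omega))
    intro t ht1 ht2
    have h1 : p.getD t 0 < 2 * p.getD i 0 := by
      have := adv_true _ _ _ t (by omega) ht2
      simpa using this
    have h2 : p.getD i 0 ≤ p.getD (i+1) 0 := hmon i (i+1) (by omega) (by omega)
    simp only [decide_eq_true_eq]
    omega
  · exact le_trans (by omega) (adv_lo_le _ _ (n-1))

theorem pvRb_mono (p : List Int) (n : Nat)
    (hmon : ∀ s t : Nat, s ≤ t → t < n - 1 → p.getD s 0 ≤ p.getD t 0)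
    (i : Nat) (h : i + 1 < n - 1) : pvRb p n i ≤ pvRb p n (i+1) := by
  rcases Nat.lt_or_ge (i+1) (pvRb p n i) with hgt | hle
  · unfold pvRb at *
    apply adv_ge _ (i+1+1) (n-1) _ (by omega) (adv_le_hi _ _ _ (by omega))
    intro t ht1 ht2
    have h1 : p.getD t 0 ≤ PySem.Int.floordiv (p.getD (n-1) 0 + p.getD i 0) 2 := by
      have := adv_true _ _ _ t (by omega) ht2
      simpa using this
    have h2 : p.getD i 0 ≤ p.getD (i+1) 0 := hmon i (i+1) (by omega) (by omega)
    have h3 := floordiv2_mono (p.getD (n-1) 0 + p.getD i 0) (p.getD (n-1) 0 + p.getD (i+1) 0) (by omega)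
    simp only [decide_eq_true_eq]
    omega
  · exact le_trans (by omega) (adv_lo_le _ _ (n-1))

theorem pvM_pos : (0:Int) < pvM := by norm_num [pvM]

theorem pvMain (p : List Int) (n : Nat) (hn : p.length = n)
    (hmon : ∀ s t : Nat, s ≤ t → t < n - 1 → p.getD s 0 ≤ p.getD t 0) :
    ∀ m, m ≤ n - 2 →
      (List.range m).foldl (pvStepB p n) (0, 0, 0) =
        ((List.range m).foldl (pvStepA p n) 0,
         (if m = 0 then 0 else pvLb p n (m-1)),
         (if m = 0 then 0 else max (pvLb p n (m-1)) (pvRb p n (m-1)))) ∧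
      0 ≤ (List.range m).foldl (pvStepA p n) 0 ∧
      (List.range m).foldl (pvStepA p n) 0 < pvM := by
  intro m
  induction m with
  | zero =>
    intro _
    refine ⟨by simp, by simp, by simpa using pvM_pos⟩
  | succ m ih =>
    intro hm
    obtain ⟨hB, hres0, hres1⟩ := ih (by omega)
    have hmn : m < n - 2 := by omega
    have hn1 : m + 1 ≤ n - 1 := by omega
    have hlb_lo : m + 1 ≤ pvLb p n m := adv_lo_le _ _ _
    have hlb_hi : pvLb p n m ≤ n - 1 := adv_le_hi _ _ _ (by omega)
    have hrb_lo : m + 1 ≤ pvRb p n m := adv_lo_le _ _ _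
    have hrb_hi : pvRb p n m ≤ n - 1 := adv_le_hi _ _ _ (by omega)
    have hjm_le : (if m = 0 then 0 else pvLb p n (m-1)) ≤ pvLb p n m := by
      cases m with
      | zero => simp
      | succ m' => simpa using pvLb_mono p n hmon m' (by omega)
    have hrbm_le : (if m = 0 then 0 else pvRb p n (m-1)) ≤ pvRb p n m := by
      cases m with
      | zero => simp
      | succ m' => simpa using pvRb_mono p n hmon m' (by omega)
    rw [List.range_succ, List.foldl_append, List.foldl_append, hB]
    simp only [List.foldl_cons, List.foldl_nil]
    set res := (List.range m).foldl (pvStepA p n) 0 with hres_def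
    rw [pvStepB]
    simp only
    have hj : pvAdvance (fun t => decide (p.getD t 0 < 2 * p.getD m 0))
        (if (if m = 0 then 0 else pvLb p n (m-1)) < m + 1 then m + 1
         else (if m = 0 then 0 else pvLb p n (m-1))) (n-1) = pvLb p n m := by
      rw [show pvLb p n m = pvAdvance (fun t => decide (p.getD t 0 < 2 * p.getD m 0)) (m+1) (n-1) from rfl]
      refine adv_shift _ (m+1) _ (n-1) ?_ ?_
      · split_ifs <;> omega
      · rw [show pvAdvance (fun t => decide (p.getD t 0 < 2 * p.getD m 0)) (m+1) (n-1) = pvLb p n m from rfl]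
        by_cases hm0 : m = 0
        · subst hm0
          split_ifs <;> omega
        · simp only [if_neg hm0] at hjm_le ⊢
          split_ifs <;> omega
    rw [hj]
    have hk : pvAdvance (fun t => decide (p.getD t 0 ≤ PySem.Int.floordiv (p.getD (n-1) 0 + p.getD m 0) 2))
        (if (if m = 0 then 0 else max (pvLb p n (m-1)) (pvRb p n (m-1))) < pvLb p n m then pvLb p n m
         else (if m = 0 then 0 else max (pvLb p n (m-1)) (pvRb p n (m-1)))) (n-1)
        = max (pvLb p n m) (pvRb p n m) := by
      have hkm_le : (if m = 0 then 0 else max (pvLb p n (m-1)) (pvRb p n (m-1)))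
          ≤ max (pvLb p n m) (pvRb p n m) := by
        cases m with
        | zero => simp
        | succ m' =>
          simp only [Nat.succ_ne_zero, if_false] at hjm_le hrbm_le ⊢
          exact max_le_max hjm_le hrbm_le
      have hadv : pvAdvance (fun t => decide (p.getD t 0 ≤ PySem.Int.floordiv (p.getD (n-1) 0 + p.getD m 0) 2)) (m+1) (n-1) = pvRb p n m := rfl
      rcases Nat.lt_or_ge (pvRb p n m) (pvLb p n m) with hc | hc
      · have hmaxeq : max (pvLb p n m) (pvRb p n m) = pvLb p n m := max_eq_left (le_of_lt hc)
        rw [hmaxeq]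
        have hkmlb : (if m = 0 then 0 else max (pvLb p n (m-1)) (pvRb p n (m-1))) ≤ pvLb p n m := by
          rw [hmaxeq] at hkm_le; exact hkm_le
        have hk0 : (if (if m = 0 then 0 else max (pvLb p n (m-1)) (pvRb p n (m-1))) < pvLb p n m
            then pvLb p n m else (if m = 0 then 0 else max (pvLb p n (m-1)) (pvRb p n (m-1)))) = pvLb p n m := by
          by_cases hm0 : m = 0
          · subst hm0
            split_ifs <;> omega
          · simp only [if_neg hm0] at hkmlb ⊢
            split_ifs <;> omega
        rw [hk0]
        rcases Nat.lt_or_ge (pvLb p n m) (n-1) with hlt | hge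
        · apply adv_stop
          have hfrb : (fun t => decide (p.getD t 0 ≤ PySem.Int.floordiv (p.getD (n-1) 0 + p.getD m 0) 2)) (pvRb p n m) = false := by
            rw [← hadv]
            exact adv_false _ _ _ (by rw [hadv]; omega)
          simp only [decide_eq_false_iff_not, not_le] at hfrb ⊢
          have : p.getD (pvRb p n m) 0 ≤ p.getD (pvLb p n m) 0 := hmon _ _ (by omega) (by omega)
          omega
        · exact adv_top _ _ _ (by omega)
      · have hmaxeq : max (pvLb p n m) (pvRb p n m) = pvRb p n m := max_eq_right hc
        rw [hmaxeq, ← hadv]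
        have hkmrb : (if m = 0 then 0 else max (pvLb p n (m-1)) (pvRb p n (m-1))) ≤ pvRb p n m := by
          rw [hmaxeq] at hkm_le; exact hkm_le
        refine adv_shift _ (m+1) _ (n-1) ?_ ?_
        · split_ifs <;> omega
        · rw [hadv]
          by_cases hm0 : m = 0
          · subst hm0
            split_ifs <;> omega
          · simp only [if_neg hm0] at hkmrb ⊢
            split_ifs <;> omega
    rw [hk]
    rw [pvStepA]
    rcases Nat.lt_or_ge (pvLb p n m) (pvRb p n m) with hc | hc
    · have hif : ((pvRb p n m : Int) > (pvLb p n m : Int)) := by exact_mod_cast hc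
      rw [if_pos hif]
      have hmaxeq : max (pvLb p n m) (pvRb p n m) = pvRb p n m := max_eq_right (le_of_lt hc)
      rw [hmaxeq]
      refine ⟨by simp [hmaxeq], ?_, ?_⟩
      · exact PySem.Int.mod_nonneg _ pvM_pos
      · exact PySem.Int.mod_lt _ pvM_pos
    · have hif : ¬ ((pvRb p n m : Int) > (pvLb p n m : Int)) := by exact_mod_cast not_lt.mpr hc
      rw [if_neg hif]
      have hmaxeq : max (pvLb p n m) (pvRb p n m) = pvLb p n m := max_eq_left hc
      rw [hmaxeq]
      have harith : res + (pvLb p n m : Int) - (pvLb p n m : Int) = res := by ring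
      rw [harith]
      have hmodeq : PySem.Int.mod res pvM = res := by
        rw [PySem.Int.mod_eq_emod_of_pos pvM_pos]
        exact Int.emod_eq_of_lt hres0 hres1
      rw [hmodeq]
      exact ⟨by simp [hmaxeq], hres0, hres1⟩

theorem pyGetD_neg_one (p : List Int) (h : p ≠ []) : PySem.List.pyGetD p (-1) 0 = p.getD (p.length - 1) 0 := by
  have hl : 1 ≤ p.length := by cases p with | nil => simp at h | cons a l => simp
  simp [PySem.List.pyGetD, PySem.List.pyGet?, PySem.List.pyIdx?, hl, List.getD]

theorem waysToSplit_eq (nums : List Int) (hne : nums ≠ []) (hnn : ∀ x ∈ (nums.drop 1).dropLast, 0 ≤ x) :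
    waysToSplit nums = waysToSplit_alt nums := by
  have hn1 : 1 ≤ nums.length := by cases nums with | nil => simp at hne | cons a l => simp
  have hlen : (pvPref nums).length = nums.length := pvPref_length nums
  have hmon := pvPref_mono nums hnn
  have hpne : pvPref nums ≠ [] := by
    intro hc
    rw [hc] at hlen
    simp at hlen
    omega
  simp only [waysToSplit, waysToSplit_alt]
  rw [prefA_eq nums hne, prefB_eq nums]
  rw [pyGetD_neg_one _ hpne, hlen]
  refine Eq.trans (PySem.List.foldl_congr_mem _ _ (pvStepA (pvPref nums) nums.length) _ ?_) ?_
  · intro acc i hi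
    have hi' : i < nums.length - 2 := List.mem_range.mp hi
    rw [bisectLeftLoop_eq_adv (pvPref nums) _ (nums.length - 1) hmon nums.length (i+1) (nums.length-1)
          (by rw [hlen]; omega) le_rfl (by omega),
        bisectRightLoop_eq_adv (pvPref nums) _ (nums.length - 1) hmon nums.length (i+1) (nums.length-1)
          (by rw [hlen]; omega) le_rfl (by omega)]
    rfl
  · have h2 := (pvMain (pvPref nums) nums.length hlen hmon (nums.length - 2) le_rfl).1
    have h3 : (List.foldl (pvStepB (pvPref nums) nums.length) (0, 0, 0) (List.range (nums.length - 2))).1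
        = List.foldl (pvStepA (pvPref nums) nums.length) 0 (List.range (nums.length - 2)) := by
      rw [h2]
    exact h3.symm

-- ===== VERDICT (by name: the statement is the Claim_ definition above) =====
theorem waysToSplit_spec : Claim_equal_waysToSplit := by
  intro nums _ hpre
  exact waysToSplit_eq nums hpre.1 hpre.2
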